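-- pv_equiv track=rewrite | github.com/MaTaha-ualr/hybrid-entity-resolution-historical-records | z_Taha_Code/hm_taha_modules/cell08.py | smart_select_name
-- ===== SOURCE A (Python) =====
-- from typing import List, Dict, Tuple, Optional
-- from collections import Counter
--
-- def normalize_for_comparison(text: str) -> str:
--     """Normalize text for comparison (remove extra spaces, standardize case)."""
--     return " ".join(text.strip().upper().split())
--
-- def smart_select_name(candidates: List[str], raw_names: List[str]) -> Tuple[str, str]:
--     """
--     Smart name selection with multiple fallback strategies before LLM.
--     Returns (chosen_name, selection_method)
--     """
--     if not candidates:
--         if raw_names: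
--             chosen = max(raw_names, key=len)
--             return chosen, "fallback_raw_longest"
--         return "", "no_candidates"
--
--     if len(candidates) == 1:
--         return candidates[0], "single_candidate"
--
--     # Normalize candidates for comparison
--     normalized_candidates = [normalize_for_comparison(c) for c in candidates]
--
--     # Check if all normalized candidates are identical
--     if len(set(normalized_candidates)) == 1:
--         # Return the longest original version (preserves better formatting)
--         chosen = max(candidates, key=len)
--         return chosen, "identical_normalized"
--
--     # Check for clear "most complete" name (contains all parts of others)
--     complete_candidate = find_most_complete_name(candidates)
--     if complete_candidate:
--         return complete_candidate, "most_complete"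
--
--     # Check for majority consensus (if one name appears multiple times)
--     name_counts = Counter(normalized_candidates)
--     if name_counts.most_common(1)[0][1] > 1:
--         most_common_normalized = name_counts.most_common(1)[0][0]
--         # Find original version of most common
--         for orig, norm in zip(candidates, normalized_candidates):
--             if norm == most_common_normalized:
--                 return orig, "majority_consensus"
--
--     # Need LLM decision
--     return "", "needs_llm"
--
-- def find_most_complete_name(candidates: List[str]) -> Optional[str]:
--     """
--     Find a name that contains all parts of other names (is most complete).
--     Returns None if no clear winner.
--     """
--     def name_parts(name: str) -> set:
--         return set(name.strip().upper().split())
--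
--     candidates_parts = [(c, name_parts(c)) for c in candidates]
--
--     for candidate, parts in candidates_parts:
--         # Check if this candidate contains all parts of all other candidates
--         is_most_complete = True
--         for other_candidate, other_parts in candidates_parts:
--             if candidate != other_candidate and not other_parts.issubset(parts):
--                 is_most_complete = False
--                 break
--
--         if is_most_complete and len(parts) > 1:  # Ensure it's not just a single part
--             return candidate
--
--     return None
-- ===== SOURCE B (Python) =====
-- from typing import List, Tuple
-- from collections import Counter
--
-- def smart_select_name(candidates: List[str], raw_names: List[str]) -> Tuple[str, str]:
--     if not candidates:
--         if raw_names:
--             return max(raw_names, key=len), "fallback_raw_longest"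
--         return "", "no_candidates"
--     if len(candidates) == 1:
--         return candidates[0], "single_candidate"
--     norms = [" ".join(c.strip().upper().split()) for c in candidates]
--     if all(n == norms[0] for n in norms):
--         return max(candidates, key=len), "identical_normalized"
--     # most complete: precompute the union of all part sets once; a candidate dominates
--     # every other candidate iff its part set covers the union (no pairwise scan)
--     part_sets = [set(c.strip().upper().split()) for c in candidates]
--     union = set()
--     for p in part_sets:
--         union |= p
--     for c, p in zip(candidates, part_sets):
--         if union <= p and len(p) > 1:
--             return c, "most_complete"
--     # majority: one scan for the first candidate whose normalized form has maximal count
--     counts = Counter(norms)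
--     maxc = max(counts.values())
--     if maxc > 1:
--         for c, n in zip(candidates, norms):
--             if counts[n] == maxc:
--                 return c, "majority_consensus"
--     return "", "needs_llm"
-- ===== Notes on version B (the rewrite author's own statement) =====
-- stated objective: alternative
-- what changed: B replaces A's pairwise subset scan in find_most_complete_name with one precomputed union of all part sets (a candidate dominates all others iff its parts cover the union), and replaces Counter.most_common(1) plus a second matching pass with a single scan for the first candidate whose normalized form attains the maximal count.
import Mathlib
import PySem

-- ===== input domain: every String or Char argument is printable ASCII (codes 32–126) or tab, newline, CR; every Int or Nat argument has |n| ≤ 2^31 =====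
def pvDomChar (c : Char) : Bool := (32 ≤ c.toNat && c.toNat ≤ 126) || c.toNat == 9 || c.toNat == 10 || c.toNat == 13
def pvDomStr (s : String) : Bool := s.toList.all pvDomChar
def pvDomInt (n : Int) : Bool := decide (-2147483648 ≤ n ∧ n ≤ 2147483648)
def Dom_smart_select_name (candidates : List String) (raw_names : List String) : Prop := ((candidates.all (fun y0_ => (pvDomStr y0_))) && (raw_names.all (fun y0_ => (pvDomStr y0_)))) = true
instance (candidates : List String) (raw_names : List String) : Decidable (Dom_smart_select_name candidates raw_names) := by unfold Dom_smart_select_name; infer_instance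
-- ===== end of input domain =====

-- B replaces A's pairwise "most complete" scan with one precomputed union of all part
-- sets, and its Counter.most_common selection with a single max-count scan (objective: alternative).


-- ===== PORT A =====
def pvNormalizeForComparison (text : String) : String :=
  PySem.Str.join " " (PySem.Str.split₀ (PySem.Str.upper (PySem.Str.strip text)))

def pvNameParts (name : String) : PySem.Set String :=
  PySem.Set.ofList (PySem.Str.split₀ (PySem.Str.upper (PySem.Str.strip name)))

-- find_most_complete_name: the first candidate whose parts contain every other candidate's parts
def pvFindMostCompleteName (candidates : List String) : Option String :=
  let cp := candidates.map (fun c => (c, pvNameParts c))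
  match cp.find? (fun e =>
      cp.all (fun o => e.1 == o.1 || PySem.Set.issubset o.2 e.2) && decide (1 < e.2.length)) with
  | some e => some e.1
  | none => none

def smart_select_name (candidates : List String) (raw_names : List String) : String × String :=
  if candidates.isEmpty then
    if !raw_names.isEmpty then (PySem.List.maxD raw_names PySem.Str.len "", "fallback_raw_longest")
    else ("", "no_candidates")
  else if candidates.length == 1 then
    (candidates.headD "", "single_candidate")  -- candidates[0]; exact under the length-1 guard
  else
    let normalized := candidates.map pvNormalizeForComparison
    if PySem.Set.len (PySem.Set.ofList normalized) == 1 then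
      (PySem.List.maxD candidates PySem.Str.len "", "identical_normalized")
    else
      match pvFindMostCompleteName candidates with
      | some c => (c, "most_complete")
      | none =>
        let counts := PySem.Dict.counter normalized
        -- most_common(1)[0] = the first item of maximal count (insertion order on ties)
        let best := PySem.List.maxD counts.items (fun it => it.2) ("", 0)
        if 1 < best.2 then
          match (candidates.zip normalized).find? (fun p => p.2 == best.1) with
          | some p => (p.1, "majority_consensus")
          | none => ("", "needs_llm")
        else ("", "needs_llm")

-- ===== PORT B =====
def smart_select_name_alt (candidates : List String) (raw_names : List String) : String × String :=
  match candidates with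
  | [] =>
    match raw_names with
    | [] => ("", "no_candidates")
    | _ :: _ => (PySem.List.maxD raw_names PySem.Str.len "", "fallback_raw_longest")
  | [c] => (c, "single_candidate")
  | _ =>
    let norms := candidates.map (fun c =>
      PySem.Str.join " " (PySem.Str.split₀ (PySem.Str.upper (PySem.Str.strip c))))
    if norms.all (fun n => n == norms.headD "") then
      (PySem.List.maxD candidates PySem.Str.len "", "identical_normalized")
    else
      let partSets := candidates.map (fun c =>
        PySem.Set.ofList (PySem.Str.split₀ (PySem.Str.upper (PySem.Str.strip c))))
      let un := partSets.foldl (fun u p => PySem.Set.union u p) PySem.Set.empty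
      match (candidates.zip partSets).find? (fun cp =>
          PySem.Set.issubset un cp.2 && decide (1 < cp.2.length)) with
      | some cp => (cp.1, "most_complete")
      | none =>
        let counts := PySem.Dict.counter norms
        let maxc := PySem.List.maxD counts.values (fun v => v) 0
        if 1 < maxc then
          match (candidates.zip norms).find? (fun p => PySem.Dict.getD counts p.2 0 == maxc) with
          | some p => (p.1, "majority_consensus")
          | none => ("", "needs_llm")
        else ("", "needs_llm")

-- ===== PRECONDITION & SPEC =====
def Spec_smart_select_name (candidates : List String) (raw_names : List String) (out : String × String) : Prop := out = smart_select_name_alt candidates raw_names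
instance (candidates : List String) (raw_names : List String) (out : String × String) : Decidable (Spec_smart_select_name candidates raw_names out) := by unfold Spec_smart_select_name; infer_instance

-- ===== CLAIM (what is proved, stated in full; the proofs are below) =====
def Claim_equal_smart_select_name : Prop := ∀ (candidates : List String) (raw_names : List String), Dom_smart_select_name candidates raw_names → Spec_smart_select_name candidates raw_names (smart_select_name candidates raw_names)

-- ===== LEMMAS AND PROOFS =====

-- find? sees through a filter that only removes non-matching elements
theorem pv_find?_filter {α : Type} (l : List α) (p q : α → Bool)
    (h : ∀ a, p a = true → q a = true) : (l.filter q).find? p = l.find? p := by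
  induction l with
  | nil => rfl
  | cons x t ih =>
    by_cases hx : p x = true
    · rw [List.filter_cons, if_pos (h x hx), List.find?_cons_of_pos hx,
        List.find?_cons_of_pos hx]
    · rw [List.find?_cons_of_neg hx, List.filter_cons]
      split
      · rw [List.find?_cons_of_neg hx]; exact ih
      · exact ih

-- the first match in a list is the first match in its ordered dedup
theorem pv_find?_ofList {α : Type} [BEq α] [LawfulBEq α] (ks : List α) (p : α → Bool) :
    (PySem.Set.ofList ks).find? p = ks.find? p := by
  induction ks with
  | nil => simp [PySem.Set.ofList_nil]
  | cons x t ih =>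
    rw [PySem.Set.ofList_cons]
    by_cases hx : p x = true
    · rw [List.find?_cons_of_pos hx, List.find?_cons_of_pos hx]
    · rw [List.find?_cons_of_neg hx, List.find?_cons_of_neg hx, ← ih]
      show ((PySem.Set.ofList t).filter (fun y => !y == x)).find? p = _
      refine pv_find?_filter _ p _ ?_
      intro a ha
      have hax : a ≠ x := fun h => hx (h ▸ ha)
      simp [hax]

-- all members equal the head ↔ the dedup has exactly one element
theorem pv_ofList_len_one {α : Type} [BEq α] [LawfulBEq α] (x : α) (t : List α) :
    ((PySem.Set.ofList (x :: t)).length = 1 ↔ ∀ n ∈ x :: t, n = x) := by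
  rw [PySem.Set.ofList_cons]
  constructor
  · intro h n hn
    have hd : (PySem.Set.ofList t).discard x = [] := by
      cases hdd : (PySem.Set.ofList t).discard x with
      | nil => rfl
      | cons a b => simp [hdd] at h
    rcases hn with _ | hn
    · rfl
    · rename_i hmem
      by_contra hne
      have : n ∈ (PySem.Set.ofList t).discard x := by
        rw [PySem.Set.mem_discard]
        exact ⟨(PySem.Set.mem_ofList t n).2 hmem, hne⟩
      simp [hd] at this
  · intro h
    have hd : (PySem.Set.ofList t).discard x = [] := by
      rw [List.eq_nil_iff_forall_not_mem]
      intro a ha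
      rw [PySem.Set.mem_discard] at ha
      exact ha.2 (h a (by simp [(PySem.Set.mem_ofList t a).1 ha.1]))
    simp [hd]

-- maxD on a nonempty list is the left fold keeping the first maximal element
theorem pv_maxD_cons {α κ : Type} [LT κ] [DecidableLT κ] (x : α) (t : List α) (f : α → κ) (d : α) :
    PySem.List.maxD (x :: t) f d = t.foldl (fun b a => if f b < f a then a else b) x := by
  suffices h : ∀ (t : List α) (x : α),
      PySem.List.max? (x :: t) f = some (t.foldl (fun b a => if f b < f a then a else b) x) by
    simp [PySem.List.maxD, h t x]
  intro t
  induction t with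
  | nil => intro x; rfl
  | cons y t' ih =>
    intro x
    show List.foldl _ (if f x < f y then some y else some x) t' = _
    by_cases hxy : f x < f y <;> simp [hxy, List.foldl_cons, ← ih]
    · rfl
    · rfl

-- naturality: maxD of a mapped list is the image of maxD under the composed key
theorem pv_maxD_map {α β κ : Type} [LT κ] [DecidableLT κ] (l : List α) (g : α → β)
    (key : β → κ) (d : β) (d' : α) (hne : l ≠ []) :
    PySem.List.maxD (l.map g) key d = g (PySem.List.maxD l (fun a => key (g a)) d') := by
  cases l with
  | nil => exact absurd rfl hne
  | cons x t =>
    rw [List.map_cons, pv_maxD_cons, pv_maxD_cons]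
    induction t generalizing x with
    | nil => rfl
    | cons y t' ih =>
      simp only [List.map_cons, List.foldl_cons]
      by_cases h : key (g x) < key (g y) <;> simp [h, ih]

-- the fold keeping the first maximal element really is the FIRST maximal element
theorem pv_foldl_firstMax {α κ : Type} [LinearOrder κ] [BEq κ] [LawfulBEq κ]
    (t : List α) (x : α) (f : α → κ) :
    (∀ y ∈ x :: t, f y ≤ f (t.foldl (fun b a => if f b < f a then a else b) x)) ∧
    (x :: t).find? (fun y => f y == f (t.foldl (fun b a => if f b < f a then a else b) x))
      = some (t.foldl (fun b a => if f b < f a then a else b) x) := by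
  induction t generalizing x with
  | nil => simp
  | cons y t' ih =>
    by_cases hxy : f x < f y
    · have hy := ih y
      simp only [List.foldl_cons, if_pos hxy]
      refine ⟨?_, ?_⟩
      · intro z hz
        rcases List.mem_cons.1 hz with rfl | hz
        · exact le_trans (le_of_lt hxy) (hy.1 _ (by simp))
        · exact hy.1 z hz
      · have hlt : f x < f (t'.foldl (fun b a => if f b < f a then a else b) y) :=
          lt_of_lt_of_le hxy (hy.1 y (by simp))
        rw [List.find?_cons_of_neg (by simp [ne_of_lt hlt])]
        exact hy.2
    · have hx' := ih x
      simp only [List.foldl_cons, if_neg hxy]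
      set M := t'.foldl (fun b a => if f b < f a then a else b) x with hM
      refine ⟨?_, ?_⟩
      · intro z hz
        rcases List.mem_cons.1 hz with rfl | hz
        · exact hx'.1 _ (by simp)
        · rcases List.mem_cons.1 hz with rfl | hz
          · exact le_trans (le_of_not_gt hxy) (hx'.1 _ (by simp))
          · exact hx'.1 z (by simp [hz])
      · have hfind := hx'.2
        by_cases hx : f x = f M
        · rw [List.find?_cons_of_pos (by simp [hx])] at hfind ⊢
          exact hfind
        · rw [List.find?_cons_of_neg (by simp [hx])] at hfind ⊢
          have hy : ¬ (f y = f M) := by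
            intro hy
            have h1 : f y ≤ f x := le_of_not_gt hxy
            have h2 : f x ≤ f M := hx'.1 x (by simp)
            exact hx (le_antisymm h2 (hy ▸ h1))
          rw [List.find?_cons_of_neg (by simp [hy])]
          exact hfind

-- membership in the fold of unions
theorem pv_mem_foldl_union {α : Type} [BEq α] [LawfulBEq α]
    (l : List (PySem.Set α)) (acc : PySem.Set α) (x : α) :
    x ∈ l.foldl (fun u p => PySem.Set.union u p) acc ↔ x ∈ acc ∨ ∃ s ∈ l, x ∈ s := by
  induction l generalizing acc with
  | nil => simp
  | cons s t ih =>
    rw [List.foldl_cons, ih, PySem.Set.mem_union]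
    constructor
    · rintro ((h | h) | ⟨u, hu, hx⟩)
      · exact Or.inl h
      · exact Or.inr ⟨s, by simp, h⟩
      · exact Or.inr ⟨u, by simp [hu], hx⟩
    · rintro (h | ⟨u, hu, hx⟩)
      · exact Or.inl (Or.inl h)
      · rcases List.mem_cons.1 hu with rfl | hu
        · exact Or.inl (Or.inr hx)
        · exact Or.inr ⟨u, hu, hx⟩

-- find? is determined by the predicate's value on the members
theorem pv_find?_congr {α : Type} (l : List α) (p q : α → Bool)
    (h : ∀ a ∈ l, p a = q a) : l.find? p = l.find? q := by
  induction l with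
  | nil => rfl
  | cons x t ih =>
    rw [List.find?_cons, List.find?_cons, h x (by simp)]
    split
    · rfl
    · exact ih (fun a ha => h a (by simp [ha]))

-- on a zipped list: searching for the unique first-maximal key equals searching by maximal count
theorem pv_find?_zip_eq {α β : Type} [BEq β] [LawfulBEq β] {κ : Type} [BEq κ] [LawfulBEq κ]
    (cs : List α) (ks : List β) (f : β → κ) (b : β) (m : κ)
    (hfirst : ∀ n, ks.find? (fun n => f n == m) = some n → n = b)
    (hbm : f b = m) :
    (cs.zip ks).find? (fun z => z.2 == b) = (cs.zip ks).find? (fun z => f z.2 == m) := by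
  induction cs generalizing ks with
  | nil => rfl
  | cons c cs' ih =>
    cases ks with
    | nil => rfl
    | cons k ks' =>
      by_cases hk : f k = m
      · have hkb : k = b := hfirst k (by rw [List.find?_cons_of_pos (by simp [hk])])
        rw [List.zip_cons_cons, List.find?_cons_of_pos (by simp [hkb]),
          List.find?_cons_of_pos (by simp [hk])]
      · have hkb : ¬ (k = b) := fun h => hk (h ▸ hbm)
        rw [List.zip_cons_cons, List.find?_cons_of_neg (by simp [hkb]),
          List.find?_cons_of_neg (by simp [hk])]
        exact ih ks' (fun n hn => hfirst n (by rw [List.find?_cons_of_neg (by simp [hk])]; exact hn))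

-- the two "identical normalized" guards agree
theorem pv_identical_guard (n0 : String) (nt : List String) :
    (PySem.Set.len (PySem.Set.ofList (n0 :: nt)) == 1)
      = (n0 :: nt).all (fun n => n == (n0 :: nt).headD "") := by
  have h1 : (PySem.Set.len (PySem.Set.ofList (n0 :: nt)) == 1) = true
      ↔ (PySem.Set.ofList (n0 :: nt)).length = 1 := by
    rw [PySem.Set.len_eq]
    constructor
    · intro h; exact_mod_cast (beq_iff_eq).1 h
    · intro h; exact (beq_iff_eq).2 (by exact_mod_cast h)
  have h2 : ((n0 :: nt).all (fun n => n == (n0 :: nt).headD "")) = true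
      ↔ ∀ n ∈ n0 :: nt, n = n0 := by
    simp [List.all_eq_true]
  rcases hA : (PySem.Set.len (PySem.Set.ofList (n0 :: nt)) == 1) with _ | _ <;>
    rcases hB : ((n0 :: nt).all (fun n => n == (n0 :: nt).headD "")) with _ | _
  · rfl
  · have : (PySem.Set.len (PySem.Set.ofList (n0 :: nt)) == 1) = true :=
      h1.2 ((pv_ofList_len_one n0 nt).2 (h2.1 hB))
    rw [hA] at this; exact absurd this (by simp)
  · have : ((n0 :: nt).all (fun n => n == (n0 :: nt).headD "")) = true :=
      h2.2 ((pv_ofList_len_one n0 nt).1 (h1.1 hA))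
    rw [hB] at this; exact absurd this (by simp)
  · rfl

theorem pv_zip_self_map {α β : Type} (l : List α) (f : α → β) :
    l.zip (l.map f) = l.map (fun c => (c, f c)) := by
  induction l with
  | nil => rfl
  | cons x t ih => simp [ih]

-- the pairwise "contains all parts of every other candidate" test equals one subset test
-- against the precomputed union of all part sets
theorem pv_complete_pred {α β : Type} [BEq α] [LawfulBEq α] [BEq β] [LawfulBEq β]
    (P : α → PySem.Set β) (cs : List α) (e : α × PySem.Set β)
    (he : e ∈ cs.map (fun c => (c, P c))) :
    ((cs.map (fun c => (c, P c))).all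
        (fun o => e.1 == o.1 || PySem.Set.issubset o.2 e.2))
      = PySem.Set.issubset
          ((cs.map P).foldl (fun u p => PySem.Set.union u p) PySem.Set.empty) e.2 := by
  rcases List.mem_map.1 he with ⟨c, hc, rfl⟩
  rw [Bool.eq_iff_iff]
  rw [List.all_eq_true, PySem.Set.issubset_iff]
  constructor
  · intro h x hx
    rcases (pv_mem_foldl_union _ _ _).1 hx with hemp | ⟨s, hs, hxs⟩
    · rw [PySem.Set.empty_eq] at hemp; simp at hemp
    · rcases List.mem_map.1 hs with ⟨o1, ho1, rfl⟩
      have h2 := h (o1, P o1) (List.mem_map.2 ⟨o1, ho1, rfl⟩)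
      rcases Bool.or_eq_true_iff.1 h2 with hco | hsub
      · have hceq : c = o1 := by simpa using hco
        subst hceq
        exact hxs
      · exact (PySem.Set.issubset_iff _ _).1 hsub x hxs
  · intro h o ho
    rcases List.mem_map.1 ho with ⟨o1, ho1, rfl⟩
    refine Bool.or_eq_true_iff.2 (Or.inr ?_)
    refine (PySem.Set.issubset_iff _ _).2 (fun x hx => h x ?_)
    exact (pv_mem_foldl_union _ _ _).2 (Or.inr ⟨P o1, List.mem_map.2 ⟨o1, ho1, rfl⟩, hx⟩)

-- Counter.most_common(1) tie-break: the first candidate whose normalized form attains the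
-- maximal count is the first original matching most_common's key
theorem pv_majority (cs : List String) (n0 : String) (nt : List String) :
    (if 1 < (PySem.List.maxD (PySem.Dict.counter (n0 :: nt)).items (fun it => it.2) ("", 0)).2 then
      match List.find? (fun p => p.2 ==
          (PySem.List.maxD (PySem.Dict.counter (n0 :: nt)).items (fun it => it.2) ("", 0)).1)
          (cs.zip (n0 :: nt)) with
      | some p => (p.1, "majority_consensus")
      | none => ("", "needs_llm")
    else ("", "needs_llm"))
    = (if 1 < PySem.List.maxD (PySem.Dict.counter (n0 :: nt)).values (fun v => v) 0 then
      match List.find? (fun p => (PySem.Dict.counter (n0 :: nt)).getD p.2 0 ==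
          PySem.List.maxD (PySem.Dict.counter (n0 :: nt)).values (fun v => v) 0)
          (cs.zip (n0 :: nt)) with
      | some p => (p.1, "majority_consensus")
      | none => ("", "needs_llm")
    else ("", "needs_llm")) := by
  have hune : PySem.Set.ofList (n0 :: nt) ≠ [] := by rw [PySem.Set.ofList_cons]; simp
  have hitems := PySem.Dict.items_counter (n0 :: nt)
  have hbest : PySem.List.maxD (PySem.Dict.counter (n0 :: nt)).items (fun it => it.2) ("", 0)
      = (PySem.List.maxD (PySem.Set.ofList (n0 :: nt))
            (fun k => ((List.count k (n0 :: nt) : Nat) : Int)) "",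
         ((List.count (PySem.List.maxD (PySem.Set.ofList (n0 :: nt))
            (fun k => ((List.count k (n0 :: nt) : Nat) : Int)) "") (n0 :: nt) : Nat) : Int)) := by
    rw [hitems, pv_maxD_map (PySem.Set.ofList (n0 :: nt))
      (fun k => (k, ((List.count k (n0 :: nt) : Nat) : Int))) (fun it => it.2) ("", 0) "" hune]
  have hvals : (PySem.Dict.counter (n0 :: nt)).values
      = (PySem.Set.ofList (n0 :: nt)).map (fun k => ((List.count k (n0 :: nt) : Nat) : Int)) := by
    show (PySem.Dict.counter (n0 :: nt)).items.map (fun x => x.2) = _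
    rw [hitems, List.map_map]
    rfl
  have hmaxc : PySem.List.maxD (PySem.Dict.counter (n0 :: nt)).values (fun v => v) 0
      = ((List.count (PySem.List.maxD (PySem.Set.ofList (n0 :: nt))
            (fun k => ((List.count k (n0 :: nt) : Nat) : Int)) "") (n0 :: nt) : Nat) : Int) := by
    rw [hvals, pv_maxD_map (PySem.Set.ofList (n0 :: nt))
      (fun k => ((List.count k (n0 :: nt) : Nat) : Int)) (fun v => v) 0 "" hune]
  simp only [hbest, hmaxc]
  by_cases hgt : (1 : Int) < ((List.count (PySem.List.maxD (PySem.Set.ofList (n0 :: nt))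
      (fun k => ((List.count k (n0 :: nt) : Nat) : Int)) "") (n0 :: nt) : Nat) : Int)
  · rw [if_pos hgt, if_pos hgt]
    have hfold : PySem.List.maxD (PySem.Set.ofList (n0 :: nt))
        (fun k => ((List.count k (n0 :: nt) : Nat) : Int)) ""
        = ((PySem.Set.ofList nt).discard n0).foldl
            (fun b a => if ((List.count b (n0 :: nt) : Nat) : Int) < ((List.count a (n0 :: nt) : Nat) : Int) then a else b) n0 := by
      rw [PySem.Set.ofList_cons, pv_maxD_cons]
    have hfindu : (n0 :: nt).find? (fun y => ((List.count y (n0 :: nt) : Nat) : Int)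
          == ((List.count (PySem.List.maxD (PySem.Set.ofList (n0 :: nt))
              (fun k => ((List.count k (n0 :: nt) : Nat) : Int)) "") (n0 :: nt) : Nat) : Int))
        = some (PySem.List.maxD (PySem.Set.ofList (n0 :: nt))
            (fun k => ((List.count k (n0 :: nt) : Nat) : Int)) "") := by
      rw [← pv_find?_ofList (n0 :: nt), hfold, PySem.Set.ofList_cons]
      exact (pv_foldl_firstMax ((PySem.Set.ofList nt).discard n0) n0
        (fun k => ((List.count k (n0 :: nt) : Nat) : Int))).2
    have hfirst : ∀ n, (n0 :: nt).find? (fun y => ((List.count y (n0 :: nt) : Nat) : Int)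
          == ((List.count (PySem.List.maxD (PySem.Set.ofList (n0 :: nt))
              (fun k => ((List.count k (n0 :: nt) : Nat) : Int)) "") (n0 :: nt) : Nat) : Int)) = some n
        → n = PySem.List.maxD (PySem.Set.ofList (n0 :: nt))
            (fun k => ((List.count k (n0 :: nt) : Nat) : Int)) "" := by
      intro n hn
      rw [hfindu] at hn
      exact (Option.some_inj.1 hn).symm
    rw [pv_find?_congr (cs.zip (n0 :: nt))
        (fun p => (PySem.Dict.counter (n0 :: nt)).getD p.2 0 ==
          ((List.count (PySem.List.maxD (PySem.Set.ofList (n0 :: nt))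
            (fun k => ((List.count k (n0 :: nt) : Nat) : Int)) "") (n0 :: nt) : Nat) : Int))
        (fun p => ((List.count p.2 (n0 :: nt) : Nat) : Int) ==
          ((List.count (PySem.List.maxD (PySem.Set.ofList (n0 :: nt))
            (fun k => ((List.count k (n0 :: nt) : Nat) : Int)) "") (n0 :: nt) : Nat) : Int))
        (fun p hp => by simp only [PySem.Dict.getD_counter]),
      pv_find?_zip_eq cs (n0 :: nt)
        (fun k => ((List.count k (n0 :: nt) : Nat) : Int))
        (PySem.List.maxD (PySem.Set.ofList (n0 :: nt))
            (fun k => ((List.count k (n0 :: nt) : Nat) : Int)) "") _ hfirst rfl]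
  · rw [if_neg hgt, if_neg hgt]

theorem pv_main (a b : String) (t rs : List String) :
    smart_select_name (a :: b :: t) rs = smart_select_name_alt (a :: b :: t) rs := by
  simp only [smart_select_name, smart_select_name_alt, List.isEmpty_cons, List.length_cons]
  rw [if_neg (by simp), if_neg (by simp)]
  rw [show (fun c => PySem.Str.join " " (PySem.Str.split₀ (PySem.Str.upper (PySem.Str.strip c))))
        = pvNormalizeForComparison from rfl,
      show (fun c => PySem.Set.ofList (PySem.Str.split₀ (PySem.Str.upper (PySem.Str.strip c))))
        = pvNameParts from rfl]
  rw [List.map_cons, pv_identical_guard, ← List.map_cons]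
  by_cases hid : ((List.map pvNormalizeForComparison (a :: b :: t)).all
      (fun n => n == (List.map pvNormalizeForComparison (a :: b :: t)).headD "")) = true
  · rw [List.map_cons] at hid ⊢; rw [if_pos hid, if_pos hid]
  · rw [List.map_cons] at hid ⊢; rw [if_neg hid, if_neg hid, ← List.map_cons]
    -- most-complete branch: both searches coincide
    simp only [pvFindMostCompleteName]
    rw [pv_zip_self_map (a :: b :: t) pvNameParts]
    rw [pv_find?_congr ((a :: b :: t).map (fun c => (c, pvNameParts c)))
          (fun cp => PySem.Set.issubset
              (((a :: b :: t).map pvNameParts).foldl (fun u p => PySem.Set.union u p) PySem.Set.empty) cp.2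
            && decide (1 < cp.2.length))
          (fun e => ((a :: b :: t).map (fun c => (c, pvNameParts c))).all
              (fun o => e.1 == o.1 || PySem.Set.issubset o.2 e.2) && decide (1 < e.2.length))
          (fun e he => by simp only [pv_complete_pred pvNameParts (a :: b :: t) e he])]
    cases hres : (((a :: b :: t)).map (fun c => (c, pvNameParts c))).find?
        (fun e => ((a :: b :: t).map (fun c => (c, pvNameParts c))).all
            (fun o => e.1 == o.1 || PySem.Set.issubset o.2 e.2) && decide (1 < e.2.length)) with
    | some e => rfl
    | none =>
      rw [List.map_cons]
      exact pv_majority (a :: b :: t) (pvNormalizeForComparison a)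
        (List.map pvNormalizeForComparison (b :: t))
-- ===== VERDICT (by name: the statement is the Claim_ definition above) =====
theorem smart_select_name_spec : Claim_equal_smart_select_name := by
  intro candidates raw_names _
  unfold Spec_smart_select_name
  match candidates with
  | [] => cases raw_names <;> rfl
  | [c] => rfl
  | a :: b :: t => exact pv_main a b t raw_names
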